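-- pv_equiv track=rewrite | github.com/AlexU-A/spec-kitty | src/specify_cli/migration/mission_state.py | _looks_like_slack_token
-- ===== SOURCE A (Python) =====
-- def _looks_like_slack_token(value: str) -> bool:
--     """Return True for Slack token shapes without regex backtracking risk."""
--     prefixes = ("xoxb-", "xoxp-", "xoxa-", "xoxr-", "xoxs-")
--     if not value.startswith(prefixes):
--         return False
--     parts = value.split("-")
--     if len(parts) < 3 or any(not part for part in parts):
--         return False
--     return all(all(ch.isalnum() for ch in part) for part in parts)
-- ===== SOURCE B (Python) =====
-- def _looks_like_slack_token(value: str) -> bool: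
--     """Return True for Slack token shapes without regex backtracking risk."""
--     if not value.startswith(("xoxb-", "xoxp-", "xoxa-", "xoxr-", "xoxs-")):
--         return False
--     segs = 1
--     prev = "-"
--     for ch in value[5:]:
--         if ch == "-":
--             if prev == "-":
--                 return False
--             segs += 1
--         elif not ch.isalnum():
--             return False
--         prev = ch
--     return prev != "-" and segs >= 2
-- ===== Notes on version B (the rewrite author's own statement) =====
-- stated objective: alternative
-- what changed: Replaces building a parts list via split on dashes followed by a length check and two nested all/any comprehension passes with a single stateful left-to-right scan over the characters after the prefix, tracking the previous character and a running segment count.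
import Mathlib
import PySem

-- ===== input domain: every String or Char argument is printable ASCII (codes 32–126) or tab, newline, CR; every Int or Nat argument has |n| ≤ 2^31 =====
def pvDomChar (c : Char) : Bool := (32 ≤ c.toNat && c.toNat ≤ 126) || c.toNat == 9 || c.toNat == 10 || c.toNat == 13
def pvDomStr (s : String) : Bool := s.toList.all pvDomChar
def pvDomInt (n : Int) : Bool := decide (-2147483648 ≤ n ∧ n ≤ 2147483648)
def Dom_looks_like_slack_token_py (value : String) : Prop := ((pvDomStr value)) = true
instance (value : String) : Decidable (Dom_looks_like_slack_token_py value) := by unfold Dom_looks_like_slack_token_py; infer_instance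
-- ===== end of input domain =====

-- B replaces A's split-into-parts-then-nested-comprehension validation by a single stateful
-- left-to-right scan over the characters after the prefix (objective: alternative decomposition).


-- ===== PORT A =====
def looks_like_slack_token_py (value : String) : Bool :=
  let prefixes : List String := ["xoxb-", "xoxp-", "xoxa-", "xoxr-", "xoxs-"]
  if !(prefixes.any (fun p => PySem.Str.startswith value p)) then false
  else
    let parts := PySem.Chars.splitOn value.toList ['-']
    if parts.length < 3 || parts.any (fun part => part.isEmpty) then false
    else parts.all (fun part => part.all (fun ch => PySem.Chars.isalnum ch))

-- ===== PORT B =====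
-- the 'for ch in value[5:]' loop of Source B: state (prev, segs)
def slackAltLoop : List Char → Char → Nat → Bool
  | [], prev, segs => prev != '-' && decide (2 ≤ segs)
  | ch :: rest, prev, segs =>
    if ch = '-' then
      if prev = '-' then false else slackAltLoop rest ch (segs + 1)
    else if PySem.Chars.isalnum ch then slackAltLoop rest ch segs
    else false

def looks_like_slack_token_py_alt (value : String) : Bool :=
  if !(["xoxb-", "xoxp-", "xoxa-", "xoxr-", "xoxs-"].any (fun p => PySem.Str.startswith value p)) then
    false
  else
    slackAltLoop (PySem.Chars.slice value.toList (some 5) none) '-' 1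

-- ===== PRECONDITION & SPEC =====
def Spec_looks_like_slack_token_py (value : String) (out : Bool) : Prop := out = looks_like_slack_token_py_alt value
instance (value : String) (out : Bool) : Decidable (Spec_looks_like_slack_token_py value out) := by unfold Spec_looks_like_slack_token_py; infer_instance

-- ===== CLAIM (what is proved, stated in full; the proofs are below) =====
def Claim_equal_looks_like_slack_token_py : Prop := ∀ (value : String), Dom_looks_like_slack_token_py value → Spec_looks_like_slack_token_py value (looks_like_slack_token_py value)

-- ===== LEMMAS AND PROOFS =====

-- simple recursive characterisation of splitOn on the single-char separator '-'
def mySplit : List Char → List (List Char)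
  | [] => [[]]
  | c :: rest => if c = '-' then [] :: mySplit rest else (mySplit rest).modifyHead (c :: ·)

lemma mySplit_ne_nil (l : List Char) : mySplit l ≠ [] := by
  cases l with
  | nil => simp [mySplit]
  | cons c rest =>
    simp only [mySplit]
    split <;> simp [List.modifyHead]
    cases h : mySplit rest with
    | nil => exact absurd h (mySplit_ne_nil rest)
    | cons a t => simp

lemma modifyHead_modifyHead {α : Type} (f g : α → α) (l : List α) :
    (l.modifyHead g).modifyHead f = l.modifyHead (f ∘ g) := by
  cases l <;> simp [List.modifyHead]

lemma splitOn_go_spec : ∀ (fuel : Nat) (l cur : List Char) (acc : List (List Char)),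
    l.length < fuel →
    PySem.Chars.splitOn.go ['-'] fuel l cur acc
      = acc.reverse ++ (mySplit l).modifyHead (cur.reverse ++ ·) := by
  intro fuel
  induction fuel with
  | zero => intro l cur acc h; omega
  | succ fuel ih =>
    intro l cur acc h
    cases l with
    | nil => simp [PySem.Chars.splitOn.go, mySplit, List.modifyHead]
    | cons c rest =>
      by_cases hc : c = '-'
      · subst hc
        have hpre : List.isPrefixOf ['-'] ('-' :: rest) = true := by
          simp [List.isPrefixOf]
        rw [PySem.Chars.splitOn.go]
        simp only [hpre, if_pos, List.length_cons, List.drop_succ_cons, List.length_nil,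
          List.drop_zero]
        rw [ih rest [] (cur.reverse :: acc) (by simpa using Nat.lt_of_succ_lt_succ h)]
        simp only [mySplit, List.modifyHead, if_pos, List.reverse_cons, List.append_assoc,
          List.singleton_append, List.append_nil]
        cases mySplit rest <;> simp
      · have hpre : List.isPrefixOf ['-'] (c :: rest) = false := by
          simp only [List.isPrefixOf, Bool.and_eq_false_iff, beq_eq_false_iff_ne, ne_eq]
          left
          exact fun he => hc he.symm
        rw [PySem.Chars.splitOn.go]
        simp only [hpre, Bool.false_eq_true, if_false]
        rw [ih rest (c :: cur) acc (by simpa using Nat.lt_of_succ_lt_succ h)]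
        simp only [mySplit, hc, if_false, List.reverse_cons]
        rw [modifyHead_modifyHead]
        cases mySplit rest <;> simp [List.modifyHead]

lemma splitOn_eq_mySplit (l : List Char) :
    PySem.Chars.splitOn l ['-'] = mySplit l := by
  rw [PySem.Chars.splitOn, splitOn_go_spec (l.length + 1) l [] [] (by omega)]
  cases h : mySplit l with
  | nil => exact absurd h (mySplit_ne_nil l)
  | cons a t => simp [List.modifyHead]

lemma all_ok_split (M : List (List Char)) :
    M.all (fun p => !p.isEmpty && p.all PySem.Chars.isalnum)
      = (!(M.any (fun p => p.isEmpty)) && M.all (fun p => p.all PySem.Chars.isalnum)) := by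
  induction M with
  | nil => simp
  | cons p M ih =>
    cases hp : p.isEmpty <;> simp [hp, ih, Bool.and_left_comm]

lemma slackAltLoop_spec : ∀ (rest : List Char) (segs : Nat),
    (slackAltLoop rest '-' segs
       = ((mySplit rest).all (fun p => !p.isEmpty && p.all PySem.Chars.isalnum)
          && decide (3 ≤ segs + (mySplit rest).length)))
    ∧ ∀ (prev : Char), prev ≠ '-' →
        slackAltLoop rest prev segs
          = ((mySplit rest).headI.all PySem.Chars.isalnum
             && ((mySplit rest).tail.all (fun p => !p.isEmpty && p.all PySem.Chars.isalnum))
             && decide (3 ≤ segs + (mySplit rest).length)) := by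
  intro rest
  induction rest with
  | nil =>
    intro segs
    constructor
    · simp [slackAltLoop, mySplit]
    · intro prev hprev
      simp [slackAltLoop, mySplit, hprev, show (3 ≤ segs + 1) ↔ (2 ≤ segs) from by omega]
  | cons c rs ih =>
    intro segs
    by_cases hc : c = '-'
    · subst hc
      constructor
      · simp [slackAltLoop, mySplit]
      · intro prev hprev
        simp only [slackAltLoop, reduceIte, if_neg hprev]
        rw [(ih (segs + 1)).1]
        simp [mySplit,
          show (3 ≤ segs + 1 + (mySplit rs).length) ↔ (3 ≤ segs + ((mySplit rs).length + 1)) from by omega]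
    · obtain ⟨m0, mt, hM⟩ : ∃ m0 mt, mySplit rs = m0 :: mt := by
        cases h : mySplit rs with
        | nil => exact absurd h (mySplit_ne_nil rs)
        | cons a t => exact ⟨a, t, rfl⟩
      have hsplit : mySplit (c :: rs) = (c :: m0) :: mt := by
        simp [mySplit, hc, hM, List.modifyHead]
      by_cases hal : PySem.Chars.isalnum c = true
      · have hmid := (ih segs).2 c hc
        rw [hM] at hmid
        constructor
        · simp only [slackAltLoop, if_neg hc, if_pos hal, hmid, hsplit]
          simp [hal, Bool.and_assoc]
          rfl
        · intro prev hprev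
          simp only [slackAltLoop, if_neg hc, if_pos hal, hmid, hsplit]
          simp [hal]
          rfl
      · constructor
        · simp [slackAltLoop, hc, hal, hsplit]
        · intro prev hprev
          simp [slackAltLoop, hc, hal, hsplit]

lemma prefix_case (a b c d : Char) (rest : List Char)
    (ha : a ≠ '-') (hb : b ≠ '-') (hc : c ≠ '-') (hd : d ≠ '-')
    (hala : PySem.Chars.isalnum a = true) (halb : PySem.Chars.isalnum b = true)
    (halc : PySem.Chars.isalnum c = true) (hald : PySem.Chars.isalnum d = true) :
    (let parts := PySem.Chars.splitOn (a :: b :: c :: d :: '-' :: rest) ['-']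
     if parts.length < 3 || parts.any (fun part => part.isEmpty) then false
     else parts.all (fun part => part.all (fun ch => PySem.Chars.isalnum ch)))
      = slackAltLoop rest '-' 1 := by
  rw [(slackAltLoop_spec rest 1).1, all_ok_split]
  simp only [splitOn_eq_mySplit]
  have hsplit : mySplit (a :: b :: c :: d :: '-' :: rest) = [a, b, c, d] :: mySplit rest := by
    obtain ⟨m0, mt, hM⟩ : ∃ m0 mt, mySplit rest = m0 :: mt := by
      cases h : mySplit rest with
      | nil => exact absurd h (mySplit_ne_nil rest)
      | cons x t => exact ⟨x, t, rfl⟩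
    simp [mySplit, ha, hb, hc, hd, List.modifyHead]
  rw [hsplit]
  simp only [List.length_cons, List.any_cons, List.all_cons]
  split_ifs with hcond
  · simp only [List.isEmpty_cons, Bool.false_or, decide_eq_true_eq, Bool.or_eq_true] at hcond
    rcases hcond with hlen | hany
    · simp [show ¬(3 ≤ 1 + (mySplit rest).length) from by omega]
    · simp [hany]
  · simp only [List.isEmpty_cons, Bool.false_or, Bool.or_eq_true, decide_eq_true_eq,
      not_or, Bool.not_eq_true] at hcond
    obtain ⟨hlen, hany⟩ := hcond
    simp [hala, halb, halc, hald, hany,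
      show 3 ≤ 1 + (mySplit rest).length from by omega]

-- ===== VERDICT (by name: the statement is the Claim_ definition above) =====
lemma top_case (a b c d : Char) (s : String) (rest : List Char)
    (hrest : [a, b, c, d, '-'] ++ rest = s.toList)
    (ha : a ≠ '-') (hb : b ≠ '-') (hc : c ≠ '-') (hd : d ≠ '-')
    (hala : PySem.Chars.isalnum a = true) (halb : PySem.Chars.isalnum b = true)
    (halc : PySem.Chars.isalnum c = true) (hald : PySem.Chars.isalnum d = true) :
    (let parts := PySem.Chars.splitOn s.toList ['-']
     if parts.length < 3 || parts.any (fun part => part.isEmpty) then false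
     else parts.all (fun part => part.all (fun ch => PySem.Chars.isalnum ch)))
      = slackAltLoop (PySem.Chars.slice s.toList (some 5) none) '-' 1 := by
  rw [← hrest]
  have hsl : PySem.Chars.slice ([a, b, c, d, '-'] ++ rest) (some 5) none = rest := by
    simp [PySem.Chars.slice_eq_listSlice, PySem.List.slice, PySem.List.clampIdx]
  rw [hsl]
  simpa using prefix_case a b c d rest ha hb hc hd hala halb halc hald

theorem looks_like_slack_token_py_spec : Claim_equal_looks_like_slack_token_py := by
  intro value _
  unfold Spec_looks_like_slack_token_py looks_like_slack_token_py looks_like_slack_token_py_alt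
  by_cases hpre :
      (["xoxb-", "xoxp-", "xoxa-", "xoxr-", "xoxs-"].any
        (fun p => PySem.Str.startswith value p)) = true
  · simp only [hpre, Bool.not_true, Bool.false_eq_true, if_false]
    obtain ⟨p, hp, hs⟩ := List.any_eq_true.mp hpre
    simp only [List.mem_cons, List.not_mem_nil, or_false] at hp
    rcases hp with rfl | rfl | rfl | rfl | rfl <;>
    · obtain ⟨rest, hrest⟩ := (PySem.Chars.startswith_iff _ _).mp (by simpa using hs)
      exact top_case _ _ _ _ value rest hrest (by decide) (by decide) (by decide) (by decide)
        (by decide) (by decide) (by decide) (by decide)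
  · simp only [eq_false_of_ne_true hpre, Bool.not_false, if_pos]
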